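-- pv_equiv track=rewrite | github.com/tobiasfalk/KiCAD-FreeCAD-TechDraw-Template-Generator | StandardDraw.py | numToABC
-- ===== SOURCE A (Python) =====
-- def numToABC(num):
--     retStr = "";
--     num -= 1
--     #       1    2    3    4    5    6    7    8    9    10   11   12   13   14   15   16   17   18   21  20   21   22   23   24
--     abc = ["A", "B", "C", "D", "E", "F", "G", "H", "J", "K", "L", "M", "N", "P", "Q", "R", "S", "T", "U", "V", "W", "X", "Y", "Z"];
--     ABC = [0];
--     for i in range(num):
--         ABC[0] = ABC[0] + 1;
--         for x in range(len(ABC)):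
--             if ABC[x] == 24 and x  != len(ABC) - 1:
--                 ABC[x] = 0;
--                 ABC[x+1] = ABC[x+1] + 1;
--             elif ABC[x] == 24 and x ==len(ABC) - 1:
--                 ABC[x] = 0;
--                 ABC.append(0);
--
--     for i in range(len(ABC)):
--         retStr = retStr + abc[ABC[len(ABC) - 1 -i]]
--         if len(ABC) > 1 and i != len(ABC)-1:
--             retStr += '\n'
--
--     return retStr;
-- ===== SOURCE B (Python) =====
-- def numToABC(num):
--     # Direct bijective base-24 conversion (digits A..Z without I and O),
--     # O(log num) instead of A's counting loop.
--     abc = "ABCDEFGHJKLMNPQRSTUVWXYZ"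
--     if num < 1:
--         num = 1  # same as A, which treats non-positive input like the first column
--     digits = []
--     while num > 0:
--         num, r = divmod(num - 1, 24)
--         digits.append(abc[r])
--     return "\n".join(reversed(digits))
-- ===== Notes on version B (the rewrite author's own statement) =====
-- stated objective: faster
-- what changed: A counts from 1 up to num, incrementing a base-24 digit list one step at a time with an inner carry scan; B computes the bijective base-24 digits directly by repeated divmod(num-1, 24).
import Mathlib
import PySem

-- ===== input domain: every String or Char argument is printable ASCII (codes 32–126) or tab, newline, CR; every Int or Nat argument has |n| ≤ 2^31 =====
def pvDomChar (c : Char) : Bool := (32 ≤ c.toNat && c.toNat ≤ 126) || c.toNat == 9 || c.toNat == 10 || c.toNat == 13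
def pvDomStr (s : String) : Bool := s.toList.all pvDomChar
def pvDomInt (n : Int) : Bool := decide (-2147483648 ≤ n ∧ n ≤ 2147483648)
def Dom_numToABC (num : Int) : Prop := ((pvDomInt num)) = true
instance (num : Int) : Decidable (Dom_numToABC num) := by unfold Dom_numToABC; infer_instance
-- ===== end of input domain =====

-- B replaces A's one-step-at-a-time counting loop by direct base-24 divmod conversion (faster, asymptotic).

-- ===== PORT A =====
def pvAbcA : List String :=
  ["A","B","C","D","E","F","G","H","J","K","L","M","N","P","Q","R","S","T","U","V","W","X","Y","Z"]

-- body of A's inner `for x in range(len(ABC))` carry loop; list indexing ABC[x] is ported with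
-- the total pyGetD/pySetD forms (every index is in range in every execution of A)
def pvStepA (s : List Int) (x : Int) : List Int :=
  if PySem.List.pyGetD s x 0 = 24 ∧ x ≠ (s.length : Int) - 1 then
    let s1 := PySem.List.pySetD s x 0
    PySem.List.pySetD s1 (x + 1) (PySem.List.pyGetD s1 (x + 1) 0 + 1)
  else if PySem.List.pyGetD s x 0 = 24 ∧ x = (s.length : Int) - 1 then
    PySem.List.pySetD s x 0 ++ [0]
  else s

-- one iteration of A's outer `for i in range(num)` loop: ABC[0] += 1, then the carry scan
def pvIncA (s : List Int) : List Int :=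
  let s := PySem.List.pySetD s 0 (PySem.List.pyGetD s 0 0 + 1)
  (PySem.List.pyRange 0 (s.length : Int) 1).foldl pvStepA s

-- A's final rendering loop (`for i in range(len(ABC))` building retStr)
def pvRenderA (ABC : List Int) : String :=
  (PySem.List.pyRange 0 (ABC.length : Int) 1).foldl
    (fun retStr i =>
      let retStr := retStr ++
        PySem.List.pyGetD pvAbcA (PySem.List.pyGetD ABC ((ABC.length : Int) - 1 - i) 0) ""
      if 1 < ABC.length ∧ i ≠ (ABC.length : Int) - 1 then retStr ++ "\n" else retStr) ""

def numToABC (num : Int) : String :=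
  -- num -= 1, then the outer counting loop, then the rendering loop
  pvRenderA ((PySem.List.pyRange 0 (num - 1) 1).foldl (fun s _ => pvIncA s) [0])

-- ===== PORT B =====
def pvAbcB : String := "ABCDEFGHJKLMNPQRSTUVWXYZ"

-- Source B's `while num > 0` loop; abc[r] (a one-char string, always in range) via Str.pyGet?
def pvLoopB (num : Int) (digits : List String) : List String :=
  if 0 < num then
    let q := PySem.Int.floordiv (num - 1) 24
    let r := PySem.Int.mod (num - 1) 24
    pvLoopB q (digits ++ [((PySem.Str.pyGet? pvAbcB r).map (fun c => String.ofList [c])).getD ""])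
  else digits
termination_by num.toNat
decreasing_by
  rename_i h
  simp only [PySem.Int.floordiv, Int.fdiv_eq_ediv_of_nonneg _ (by omega : (0:Int) ≤ 24)]
  have h1 : (num - 1) / 24 ≤ num - 1 := Int.ediv_le_self _ (by omega)
  have h2 : (0:Int) ≤ (num - 1) / 24 := Int.ediv_nonneg (by omega) (by omega)
  omega

def numToABC_alt (num : Int) : String :=
  -- Source B: clamp below, the divmod loop, then "\n".join(reversed(digits))
  PySem.Str.join "\n" (pvLoopB (if num < 1 then 1 else num) []).reverse

-- ===== PRECONDITION & SPEC =====
def Spec_numToABC (num : Int) (out : String) : Prop := out = numToABC_alt num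
instance (num : Int) (out : String) : Decidable (Spec_numToABC num out) := by unfold Spec_numToABC; infer_instance

-- ===== CLAIM (what is proved, stated in full; the proofs are below) =====
def Claim_equal_numToABC : Prop := ∀ (num : Int), Dom_numToABC num → Spec_numToABC num (numToABC num)

-- ===== LEMMAS AND PROOFS =====

-- the "zero-based bijective base-24" digit list (little-endian) that A's counter reaches after k increments
def pvToDig (k : Nat) : List Int :=
  if k < 24 then [(k : Int)] else ((k % 24 : Nat) : Int) :: pvToDig (k / 24 - 1)
termination_by k
decreasing_by
  have := Nat.div_le_self k 24
  omega

-- successor-with-incoming-carry on a digit list whose head has already been bumped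
def pvSuccC : List Int → List Int
  | [] => []
  | [h] => if h < 24 then [h] else [0, 0]
  | h :: d :: t => if h < 24 then h :: d :: t else 0 :: pvSuccC ((d + 1) :: t)
termination_by l => l.length

def pvBump : List Int → List Int
  | [] => []
  | d :: r => (d + 1) :: r

def pvLetterA (d : Int) : String := PySem.List.pyGetD pvAbcA d ""
def pvLetterB (d : Int) : String :=
  ((PySem.Str.pyGet? pvAbcB d).map (fun c => String.ofList [c])).getD ""

-- pvStepA with a Nat index, written with List.getD / List.set
def pvStepN (s : List Int) (x : Nat) : List Int :=
  if s.getD x 0 = 24 ∧ (x : Int) ≠ (s.length : Int) - 1 then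
    (s.set x 0).set (x + 1) ((s.set x 0).getD (x + 1) 0 + 1)
  else if s.getD x 0 = 24 ∧ (x : Int) = (s.length : Int) - 1 then
    (s.set x 0) ++ [0]
  else s

theorem pvGetAt (p t : List Int) (h : Int) : (p ++ h :: t).getD p.length 0 = h := by simp

theorem pvSetAt (p t : List Int) (h v : Int) : (p ++ h :: t).set p.length v = p ++ v :: t := by simp

theorem pvSetD_nat (s : List Int) (x : Nat) (v : Int) :
    PySem.List.pySetD s (x : Int) v = s.set x v := by
  by_cases h : x < s.length
  · simp [PySem.List.pySetD, PySem.List.pySet?, PySem.List.pyIdx?, h]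
  · rw [List.set_eq_of_length_le (by omega)]
    simp [PySem.List.pySetD, PySem.List.pySet?, PySem.List.pyIdx?, h]

theorem pvStepN_noop (s : List Int) (x : Nat) (hg : s.getD x 0 ≠ 24) : pvStepN s x = s := by
  rw [pvStepN, if_neg (fun hc => hg hc.1), if_neg (fun hc => hg hc.1)]

theorem pvSuccC_one (h : Int) : pvSuccC [h] = if h < 24 then [h] else [0, 0] := by
  simp only [pvSuccC]

theorem pvSuccC_cons (h d : Int) (t : List Int) :
    pvSuccC (h :: d :: t) = if h < 24 then h :: d :: t else 0 :: pvSuccC ((d + 1) :: t) := by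
  simp only [pvSuccC]

theorem pvStepA_cast (s : List Int) (x : Nat) : pvStepA s (x : Int) = pvStepN s x := by
  have hc : (x : Int) + 1 = ((x + 1 : Nat) : Int) := by push_cast; ring
  simp only [pvStepA, pvStepN, PySem.List.pyGetD_natCast, hc, pvSetD_nat]

theorem pvNoop (il : List Nat) (s : List Int) (hs : ∀ d ∈ s, d ≠ 24) :
    il.foldl pvStepN s = s := by
  induction il with
  | nil => rfl
  | cons x il ih =>
    have hg : s.getD x 0 ≠ 24 := by
      by_cases hx : x < s.length
      · rw [List.getD_eq_getElem s 0 hx]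
        exact hs _ (List.getElem_mem hx)
      · rw [List.getD_eq_default s 0 (by omega)]
        omega
    rw [List.foldl_cons, pvStepN_noop s x hg, ih]

theorem pvCarry (t : List Int) : ∀ (p : List Int) (h : Int),
    (∀ d ∈ p, 0 ≤ d ∧ d < 24) → (∀ d ∈ t, 0 ≤ d ∧ d < 24) → 0 ≤ h → h ≤ 24 →
    (List.range' p.length (t.length + 1)).foldl pvStepN (p ++ h :: t) = p ++ pvSuccC (h :: t) := by
  induction t with
  | nil =>
    intro p h hp ht h0 h24
    simp only [List.length_nil, Nat.zero_add, List.range'_one, List.foldl_cons, List.foldl_nil]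
    by_cases hlt : h < 24
    · rw [pvStepN_noop _ _ (by rw [pvGetAt]; omega), pvSuccC_one, if_pos hlt]
    · have h24' : h = 24 := by omega
      subst h24'
      rw [pvStepN, if_neg (fun hc => hc.2 (by simp)), if_pos ⟨pvGetAt p [] 24, by simp⟩,
        pvSetAt, pvSuccC_one, if_neg hlt]
      simp
  | cons d t' ih =>
    intro p h hp ht h0 h24
    rw [List.length_cons, List.range'_succ, List.foldl_cons]
    have hd : 0 ≤ d ∧ d < 24 := ht d (by simp)
    by_cases hlt : h < 24
    · rw [pvStepN_noop _ _ (by rw [pvGetAt]; omega)]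
      rw [pvNoop _ _ (by
        intro e he
        simp only [List.mem_append, List.mem_cons] at he
        rcases he with he | he | he | he
        · have := hp e he; omega
        · omega
        · subst he; omega
        · have := ht e (by simp [he]); omega)]
      rw [pvSuccC_cons, if_pos hlt]
    · have h24' : h = 24 := by omega
      subst h24'
      have hstep : pvStepN (p ++ 24 :: d :: t') p.length = (p ++ [0]) ++ (d + 1) :: t' := by
        rw [pvStepN, if_pos]
        · have e1 : (p ++ 24 :: d :: t').set p.length 0 = p ++ 0 :: d :: t' := pvSetAt p (d :: t') 24 0
          rw [e1]
          have e2 : p ++ 0 :: d :: t' = (p ++ [(0:Int)]) ++ d :: t' := by simp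
          have e3 : p.length + 1 = (p ++ [(0:Int)]).length := by simp
          rw [e2, e3, pvGetAt, pvSetAt]
        · refine ⟨pvGetAt p (d :: t') 24, ?_⟩
          simp
          omega
      rw [hstep]
      have hplen : p.length + 1 = (p ++ [(0:Int)]).length := by simp
      rw [hplen, ih (p ++ [(0:Int)]) (d + 1)
        (by intro e he; simp only [List.mem_append, List.mem_singleton] at he
            rcases he with he | he
            · exact hp e he
            · subst he; omega)
        (by intro e he; exact ht e (by simp [he]))
        (by omega) (by omega)]
      rw [pvSuccC_cons, if_neg hlt]
      simp

theorem pvToDig_ne_nil (k : Nat) : pvToDig k ≠ [] := by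
  rw [pvToDig]
  split <;> simp

theorem pvToDig_mem (k : Nat) : ∀ d ∈ pvToDig k, 0 ≤ d ∧ d < 24 := by
  induction k using Nat.strong_induction_on with
  | _ k ih =>
    rw [pvToDig]
    split
    · intro d hd
      simp at hd
      subst hd
      constructor <;> [positivity; (push_cast; omega)]
    · intro d hd
      rcases List.mem_cons.mp hd with hd | hd
      · subst hd
        have : k % 24 < 24 := Nat.mod_lt _ (by omega)
        constructor <;> [positivity; (push_cast; omega)]
      · exact ih (k / 24 - 1) (by have := Nat.div_le_self k 24; omega) d hd

theorem pvIncA_eq (s : List Int) (hne : s ≠ []) (hs : ∀ d ∈ s, 0 ≤ d ∧ d < 24) :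
    pvIncA s = pvSuccC (pvBump s) := by
  obtain ⟨d, rest, rfl⟩ : ∃ d rest, s = d :: rest := by
    cases s with
    | nil => exact absurd rfl hne
    | cons a l => exact ⟨a, l, rfl⟩
  have hset : PySem.List.pySetD (d :: rest) 0 (PySem.List.pyGetD (d :: rest) 0 0 + 1)
      = (d + 1) :: rest := by
    simp [PySem.List.pyGetD_zero_cons]
    have := pvSetD_nat (d :: rest) 0 (d + 1)
    simpa using this
  rw [pvIncA]
  simp only [hset]
  have hlen : (((d + 1) :: rest).length : Int) = ((rest.length + 1 : Nat) : Int) := by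
    simp
  rw [hlen, PySem.List.pyRange_zero_natCast, List.foldl_map]
  have hfun : (fun (s : List Int) (k : Nat) => pvStepA s (k : Int)) = pvStepN := by
    funext s k
    exact pvStepA_cast s k
  rw [hfun, List.range_eq_range']
  have := pvCarry rest [] (d + 1) (by simp)
    (by intro e he; exact hs e (by simp [he]))
    (by have := hs d (by simp); omega)
    (by have := hs d (by simp); omega)
  simpa [pvBump] using this

theorem pvSuccC_bump (k : Nat) : pvSuccC (pvBump (pvToDig k)) = pvToDig (k + 1) := by
  induction k using Nat.strong_induction_on with
  | _ k ih =>
    by_cases hk : k < 24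
    · by_cases hk1 : k + 1 < 24
      · rw [pvToDig, if_pos hk, pvToDig, if_pos hk1, pvBump, pvSuccC_one, if_pos (by omega)]
        have hc : ((k : Int)) + 1 = ((k + 1 : Nat) : Int) := by push_cast; ring
        rw [hc]
      · have hk23 : k = 23 := by omega
        subst hk23
        rw [pvToDig, if_pos hk, pvBump, pvSuccC_one, if_neg (by norm_num)]
        rw [pvToDig, if_neg (by omega), pvToDig, if_pos (by omega)]
        norm_num
    · obtain ⟨h2, t2, ht2⟩ : ∃ h2 t2, pvToDig (k / 24 - 1) = h2 :: t2 := by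
        cases hh : pvToDig (k / 24 - 1) with
        | nil => exact absurd hh (pvToDig_ne_nil _)
        | cons a l => exact ⟨a, l, rfl⟩
      rw [pvToDig, if_neg hk, pvBump, ht2]
      by_cases hm : k % 24 < 23
      · rw [pvSuccC_cons, if_pos (by push_cast; omega)]
        have e1 : (k + 1) % 24 = k % 24 + 1 := by omega
        have e2 : (k + 1) / 24 = k / 24 := by omega
        rw [pvToDig, if_neg (by omega), e1, e2, ht2]
        have hc : ((k % 24 : Nat) : Int) + 1 = ((k % 24 + 1 : Nat) : Int) := by push_cast; ring
        rw [hc]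
      · have hm23 : k % 24 = 23 := by omega
        have hcond : ¬ (((k % 24 : Nat) : Int) + 1 < 24) := by push_cast; omega
        rw [pvSuccC_cons, if_neg hcond]
        have hbump : (h2 + 1) :: t2 = pvBump (pvToDig (k / 24 - 1)) := by
          rw [ht2, pvBump]
        have hdiv : 1 ≤ k / 24 := by omega
        rw [hbump, ih (k / 24 - 1) (by omega)]
        have e3 : k / 24 - 1 + 1 = k / 24 := by omega
        rw [e3]
        have e4 : (k + 1) % 24 = 0 := by omega
        have e5 : (k + 1) / 24 - 1 = k / 24 := by omega
        have hr : pvToDig (k + 1) = 0 :: pvToDig (k / 24) := by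
          rw [pvToDig, if_neg (by omega), e4, e5]
          norm_num
        rw [hr]

theorem pvInc_toDig (k : Nat) : pvIncA (pvToDig k) = pvToDig (k + 1) := by
  rw [pvIncA_eq _ (pvToDig_ne_nil k) (pvToDig_mem k), pvSuccC_bump]

theorem pvOuter (k : Nat) : (List.range k).foldl (fun s _ => pvIncA s) [0] = pvToDig k := by
  induction k with
  | zero => rw [pvToDig]; rfl
  | succ n ih =>
    rw [List.range_succ, List.foldl_append, ih, List.foldl_cons, List.foldl_nil,
      pvInc_toDig]

theorem pvJoin_one (x : String) : PySem.Str.join "\n" [x] = x := by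
  rw [← String.toList_inj, PySem.Str.toList_join]
  simp [PySem.Chars.join_singleton]

theorem pvJoin_cons (x y : String) (t : List String) :
    PySem.Str.join "\n" (x :: y :: t) = x ++ "\n" ++ PySem.Str.join "\n" (y :: t) := by
  rw [← String.toList_inj]
  simp [PySem.Str.toList_join, PySem.Chars.join_cons_cons, String.toList_append]

theorem pvRenderJoin (rl : List String) (hne : rl ≠ []) : ∀ (acc : String),
    (List.range rl.length).foldl
      (fun a k => a ++ (rl.getD k "" ++ if 1 < rl.length ∧ k ≠ rl.length - 1 then "\n" else "")) acc
    = acc ++ PySem.Str.join "\n" rl := by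
  induction rl with
  | nil => exact absurd rfl hne
  | cons x rest ih =>
    cases rest with
    | nil =>
      intro acc
      simp [List.range_one, pvJoin_one]
    | cons y t =>
      intro acc
      have hsplit : List.range (x :: y :: t).length = 0 :: List.range' 1 (y :: t).length := by
        rw [List.range_eq_range', show (x :: y :: t).length = (y :: t).length + 1 from rfl,
          List.range'_succ]
      rw [hsplit, List.foldl_cons,
        if_pos (⟨by simp, by simp⟩ : 1 < (x :: y :: t).length ∧ 0 ≠ (x :: y :: t).length - 1)]
      rw [List.range'_eq_map_range, List.foldl_map]
      rw [PySem.List.foldl_congr_mem (List.range (y :: t).length) _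
        (fun a k => a ++ ((y :: t).getD k "" ++
            if 1 < (y :: t).length ∧ k ≠ (y :: t).length - 1 then "\n" else "")) _
        (by
          intro a k hk
          rw [List.mem_range] at hk
          have h2 : (x :: y :: t).getD (k + 1) "" = (y :: t).getD k "" := List.getD_cons_succ
          have h3 : (1 < (x :: y :: t).length ∧ k + 1 ≠ (x :: y :: t).length - 1)
              ↔ (1 < (y :: t).length ∧ k ≠ (y :: t).length - 1) := by
            simp only [List.length_cons] at hk ⊢
            omega
          simp only [Nat.add_comm 1 k, h2]
          by_cases hc : 1 < (y :: t).length ∧ k ≠ (y :: t).length - 1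
          · rw [if_pos hc, if_pos (h3.mpr hc)]
          · rw [if_neg hc, if_neg (fun hx => hc (h3.mp hx))])]
      rw [ih (by simp) _, pvJoin_cons]
      simp [String.append_assoc]

theorem pvRenderA_eq (ABC : List Int) (hne : ABC ≠ []) :
    pvRenderA ABC = PySem.Str.join "\n" ((ABC.map pvLetterA).reverse) := by
  have hL : 0 < ABC.length := List.length_pos_of_ne_nil hne
  set rl : List String := (ABC.map pvLetterA).reverse with hrl
  have hlen : rl.length = ABC.length := by simp [hrl]
  rw [pvRenderA, PySem.List.pyRange_zero_natCast, List.foldl_map]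
  rw [PySem.List.foldl_congr_mem (List.range ABC.length) _
    (fun a k => a ++ (rl.getD k "" ++ if 1 < rl.length ∧ k ≠ rl.length - 1 then "\n" else "")) ""
    (by
      intro a k hk
      rw [List.mem_range] at hk
      have hidx : (ABC.length : Int) - 1 - (k : Int) = ((ABC.length - 1 - k : Nat) : Int) := by
        omega
      have hk' : ABC.length - 1 - k < ABC.length := by omega
      have hget : rl.getD k ""
          = PySem.List.pyGetD pvAbcA (PySem.List.pyGetD ABC ((ABC.length : Int) - 1 - (k : Int)) 0) "" := by
        rw [hidx, PySem.List.pyGetD_natCast, hrl,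
          List.getD_reverse k (by simp only [List.length_map]; omega)]
        rw [List.getD_eq_getElem _ _ (by simp only [List.length_map]; exact hk'),
          List.getD_eq_getElem _ _ hk', List.getElem_map]
        simp [pvLetterA]
      have hcond : (1 < ABC.length ∧ (k : Int) ≠ (ABC.length : Int) - 1)
          ↔ (1 < rl.length ∧ k ≠ rl.length - 1) := by
        rw [hlen]
        omega
      simp only [← hget]
      by_cases hc : 1 < ABC.length ∧ (k : Int) ≠ (ABC.length : Int) - 1
      · rw [if_pos hc, if_pos (hcond.mp hc), String.append_assoc]
      · rw [if_neg hc, if_neg (fun hx => hc (hcond.mpr hx)), String.append_empty])]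
  rw [← hlen, pvRenderJoin rl (by simp [hrl, hne]) ""]
  simp

theorem pvLoopB_toDig (k : Nat) : ∀ (acc : List String),
    pvLoopB ((k : Int) + 1) acc = acc ++ (pvToDig k).map pvLetterB := by
  induction k using Nat.strong_induction_on with
  | _ k ih =>
    intro acc
    rw [pvLoopB, if_pos (by omega : (0:Int) < (k : Int) + 1)]
    have hsub : (k : Int) + 1 - 1 = (k : Int) := by ring
    have hq : PySem.Int.floordiv ((k : Int) + 1 - 1) 24 = ((k / 24 : Nat) : Int) := by
      rw [hsub]
      simp only [PySem.Int.floordiv, Int.fdiv_eq_ediv_of_nonneg _ (by omega : (0:Int) ≤ 24)]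
      rw [Int.natCast_div]
      norm_num
    have hr : PySem.Int.mod ((k : Int) + 1 - 1) 24 = ((k % 24 : Nat) : Int) := by
      rw [hsub]
      simp only [PySem.Int.mod, Int.fmod_eq_emod]
      rw [if_pos (by left; omega), Int.natCast_mod]
      norm_num
    simp only [hq, hr]
    by_cases hk : k < 24
    · have h0 : k / 24 = 0 := by omega
      have hm : k % 24 = k := by omega
      rw [h0, hm, Nat.cast_zero, pvLoopB, if_neg (by omega)]
      rw [pvToDig, if_pos hk]
      simp [pvLetterB]
    · have h1 : ((k / 24 : Nat) : Int) = ((k / 24 - 1 : Nat) : Int) + 1 := by omega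
      rw [h1, ih (k / 24 - 1) (by omega)]
      have hrw : pvToDig k = ((k % 24 : Nat) : Int) :: pvToDig (k / 24 - 1) := by
        rw [pvToDig, if_neg hk]
      rw [hrw]
      simp [pvLetterB]

theorem pvLetters_agree (d : Int) (h0 : 0 ≤ d) (h1 : d < 24) : pvLetterA d = pvLetterB d := by
  interval_cases d <;> decide

-- ===== VERDICT (by name: the statement is the Claim_ definition above) =====
theorem numToABC_spec : Claim_equal_numToABC := by
  intro num _
  unfold Spec_numToABC numToABC numToABC_alt
  set k : Nat := (num - 1).toNat with hkdef
  have hABC : (PySem.List.pyRange 0 (num - 1) 1).foldl (fun s _ => pvIncA s) [0] = pvToDig k := by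
    by_cases h : 0 ≤ num - 1
    · have hnum : num - 1 = ((k : Nat) : Int) := by omega
      rw [hnum, PySem.List.pyRange_zero_natCast, List.foldl_map]
      exact pvOuter k
    · have h0 : k = 0 := by omega
      rw [PySem.List.pyRange_one_eq_nil (by omega), List.foldl_nil, h0, pvToDig]
      norm_num
  rw [hABC, pvRenderA_eq _ (pvToDig_ne_nil k)]
  have hm : (if num < 1 then (1 : Int) else num) = (k : Int) + 1 := by
    split_ifs with h <;> omega
  rw [hm, pvLoopB_toDig k []]
  rw [List.nil_append,
    List.map_congr_left (fun d hd =>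
      pvLetters_agree d (pvToDig_mem k d hd).1 (pvToDig_mem k d hd).2)]
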